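-- pv_equiv track=rewrite | github.com/ljyflores/efficient-spelling-normalization-filipino | utils.py | remove_name
-- ===== SOURCE A (Python) =====
-- def remove_name(s):
--   word_lst = s.split()
--   for w in word_lst:
--     if w[0].lower()!=w[0]:
--       word_lst = word_lst[1:]
--     else:
--       break
--   return ' '.join(word_lst)
-- ===== SOURCE B (Python) =====
-- def remove_name(s):
--     # Right-to-left pass: maintain the full suffix built so far ('suffix') and the
--     # best answer ('result' = suffix starting at the leftmost non-capitalized word
--     # seen so far; the leftmost one is processed last, so it wins). No slicing.
--     suffix = []
--     result = []
--     for w in reversed(s.split()):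
--         suffix = [w] + suffix
--         if w[0].lower() == w[0]:
--             result = suffix
--     return ' '.join(result)
-- ===== Notes on version B (the rewrite author's own statement) =====
-- stated objective: alternative
-- what changed: A scans left-to-right repeatedly re-slicing the front off the working list; B makes a single right-to-left pass with an accumulator pair (current suffix, best answer), keeping the suffix whenever it starts at a non-capitalized word, so the leftmost such suffix wins and no list slicing or index search is ever done.
import Mathlib
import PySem

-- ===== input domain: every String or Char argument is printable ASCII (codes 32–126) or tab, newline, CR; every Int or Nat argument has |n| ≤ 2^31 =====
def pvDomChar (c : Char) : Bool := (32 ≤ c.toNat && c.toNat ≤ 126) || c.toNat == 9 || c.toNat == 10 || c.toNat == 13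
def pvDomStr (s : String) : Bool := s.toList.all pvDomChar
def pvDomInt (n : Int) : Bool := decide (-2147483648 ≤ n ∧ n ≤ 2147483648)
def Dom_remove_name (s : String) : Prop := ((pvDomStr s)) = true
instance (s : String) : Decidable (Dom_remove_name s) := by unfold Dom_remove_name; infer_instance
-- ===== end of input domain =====

-- B replaces A's left-to-right loop with repeated front-slicing by a single right-to-left
-- pass keeping an accumulator pair (current suffix, best answer): different traversal, no slicing.

-- ===== PORT A =====
-- A's loop: iterate w over the (original) word list, slicing the front off the working list
-- while w starts with an uppercase letter; 'break' returns the working list.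
def rnLoopA : List String → List String → List String
  | [], cur => cur
  | w :: ws, cur =>
      match PySem.Str.pyGet? w 0 with
      | none => cur   -- Python would raise IndexError here; unreachable: split() yields no empty word
      | some c => if PySem.Chars.lowerChar c ≠ c
                  then rnLoopA ws (PySem.List.slice cur (some 1) none)
                  else cur

def remove_name (s : String) : String :=
  let word_lst := PySem.Str.split₀ s
  PySem.Str.join " " (rnLoopA word_lst word_lst)

-- ===== PORT B =====
-- B's reversed-order loop with state (suffix, result): a loop over 'reversed(words)' that
-- prepends to its state is exactly structural foldr on the list; transcribed as such.
def rnScanB : List String → List String × List String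
  | [] => ([], [])
  | w :: ws =>
      let p := rnScanB ws
      let suffix := w :: p.1
      match PySem.Str.pyGet? w 0 with
      | none => (suffix, p.2)   -- Python would raise IndexError here; unreachable: split() yields no empty word
      | some c => if PySem.Chars.lowerChar c = c then (suffix, suffix) else (suffix, p.2)

def remove_name_alt (s : String) : String :=
  PySem.Str.join " " (rnScanB (PySem.Str.split₀ s)).2

-- ===== PRECONDITION & SPEC =====
def Spec_remove_name (s : String) (out : String) : Prop := out = remove_name_alt s
instance (s : String) (out : String) : Decidable (Spec_remove_name s out) := by unfold Spec_remove_name; infer_instance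

-- ===== CLAIM =====
def Claim_equal_remove_name : Prop := ∀ (s : String), Dom_remove_name s → Spec_remove_name s (remove_name s)

-- ===== LEMMAS AND PROOFS =====

-- every piece produced by Python's str.split() is nonempty
lemma split₀_go_ne_nil (cs : List Char) : ∀ (cur : List Char) (acc : List (List Char)),
    (∀ p ∈ acc, p ≠ []) → ∀ p ∈ PySem.Chars.split₀.go cs cur acc, p ≠ [] := by
  induction cs with
  | nil =>
      intro cur acc hacc p hp
      simp only [PySem.Chars.split₀.go] at hp
      by_cases hc : cur.isEmpty
      · simp [hc] at hp; exact hacc p hp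
      · simp [hc] at hp
        rcases hp with h | h
        · exact hacc p h
        · subst h; simpa [List.isEmpty_iff] using hc
  | cons c rest ih =>
      intro cur acc hacc p hp
      simp only [PySem.Chars.split₀.go] at hp
      by_cases hs : PySem.Chars.isspace c
      · by_cases hc : cur.isEmpty
        · simp [hs, hc] at hp; exact ih [] acc hacc p hp
        · simp [hs, hc] at hp
          refine ih [] (cur.reverse :: acc) ?_ p hp
          intro q hq
          simp only [List.mem_cons] at hq
          rcases hq with h | h
          · subst h; simpa [List.isEmpty_iff] using hc
          · exact hacc q h
      · simp [hs] at hp; exact ih (c :: cur) acc hacc p hp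

lemma split₀_words_ne_nil (s : String) : ∀ w ∈ PySem.Str.split₀ s, w.toList ≠ [] := by
  intro w hw
  simp only [PySem.Str.split₀, List.mem_map] at hw
  rcases hw with ⟨p, hp, rfl⟩
  have := split₀_go_ne_nil s.toList [] [] (by simp) p hp
  simpa using this

lemma pyGet?_head (w : String) (c : Char) (cs : List Char) (h : w.toList = c :: cs) :
    PySem.Str.pyGet? w 0 = some c := by
  simp [PySem.Str.pyGet?, PySem.List.pyGet?, PySem.List.pyIdx?, h]

-- the Boolean "first character is capitalized" test; both loops are characterized via dropWhile
def rnCap (w : String) : Bool :=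
  match PySem.Str.pyGet? w 0 with
  | none => false
  | some c => PySem.Chars.lowerChar c != c

lemma rnLoopA_eq_dropWhile (l : List String) (hne : ∀ w ∈ l, w.toList ≠ []) :
    rnLoopA l l = l.dropWhile rnCap := by
  induction l with
  | nil => rfl
  | cons w ws ih =>
      obtain ⟨c, cs, hw⟩ : ∃ c cs, w.toList = c :: cs := by
        cases h : w.toList with
        | nil => exact absurd h (hne w (by simp))
        | cons a b => exact ⟨a, b, rfl⟩
      have hget := pyGet?_head w c cs hw
      by_cases hcap : PySem.Chars.lowerChar c = c
      · simp only [rnLoopA, rnCap, hget, List.dropWhile_cons]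
        simp [hcap]
      · simp only [rnLoopA, rnCap, hget, List.dropWhile_cons]
        simp [hcap, PySem.List.slice_from_one, ih (fun x hx => hne x (by simp [hx]))]

lemma rnScanB_spec (l : List String) (hne : ∀ w ∈ l, w.toList ≠ []) :
    rnScanB l = (l, l.dropWhile rnCap) := by
  induction l with
  | nil => rfl
  | cons w ws ih =>
      obtain ⟨c, cs, hw⟩ : ∃ c cs, w.toList = c :: cs := by
        cases h : w.toList with
        | nil => exact absurd h (hne w (by simp))
        | cons a b => exact ⟨a, b, rfl⟩
      have hget : PySem.List.pyGet? w.toList 0 = some c := by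
        simp [PySem.List.pyGet?, PySem.List.pyIdx?, hw]
      have hih := ih (fun x hx => hne x (by simp [hx]))
      by_cases hcap : PySem.Chars.lowerChar c = c
      · simp [rnScanB, rnCap, PySem.Str.pyGet?, hget, hih, List.dropWhile_cons, hcap]
      · simp [rnScanB, rnCap, PySem.Str.pyGet?, hget, hih, List.dropWhile_cons, hcap]

-- ===== VERDICT =====
theorem remove_name_spec : Claim_equal_remove_name := by
  intro s _
  have hne := split₀_words_ne_nil s
  show remove_name s = remove_name_alt s
  simp only [remove_name, remove_name_alt]
  rw [rnLoopA_eq_dropWhile _ hne, rnScanB_spec _ hne]
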